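-- pv_equiv track=rewrite | github.com/tshokair/learning_python | wordgame/ps2_hangman.py | update_word
-- ===== SOURCE A (Python) =====
-- def findOccurences(s, ch):
--     return [i for i, letter in enumerate(s) if letter == ch]
--
-- def update_word(word_length, word_guess, letter_guess, word_answer):
--     l=findOccurences(word_answer,letter_guess)
--     new_word=word_guess
--     k=0
--     while k<len(l):
--         new_word[l[k]]=letter_guess
--         k+=1
--     return new_word
-- ===== SOURCE B (Python) =====
-- def update_word(word_length, word_guess, letter_guess, word_answer):
--     n = len(word_answer)
--     word_guess[:] = [letter_guess if i < n and word_answer[i] == letter_guess else g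
--                      for i, g in enumerate(word_guess)]
--     return word_guess
-- ===== Notes on version B (the rewrite author's own statement) =====
-- stated objective: alternative
-- what changed: Instead of scanning word_answer for match indices and writing into word_guess at each, B rebuilds word_guess positionally: one comprehension over enumerate(word_guess) choosing letter_guess where word_answer has it at that position, then slice-assigns the result back so the same list object is mutated and returned.
import Mathlib
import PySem

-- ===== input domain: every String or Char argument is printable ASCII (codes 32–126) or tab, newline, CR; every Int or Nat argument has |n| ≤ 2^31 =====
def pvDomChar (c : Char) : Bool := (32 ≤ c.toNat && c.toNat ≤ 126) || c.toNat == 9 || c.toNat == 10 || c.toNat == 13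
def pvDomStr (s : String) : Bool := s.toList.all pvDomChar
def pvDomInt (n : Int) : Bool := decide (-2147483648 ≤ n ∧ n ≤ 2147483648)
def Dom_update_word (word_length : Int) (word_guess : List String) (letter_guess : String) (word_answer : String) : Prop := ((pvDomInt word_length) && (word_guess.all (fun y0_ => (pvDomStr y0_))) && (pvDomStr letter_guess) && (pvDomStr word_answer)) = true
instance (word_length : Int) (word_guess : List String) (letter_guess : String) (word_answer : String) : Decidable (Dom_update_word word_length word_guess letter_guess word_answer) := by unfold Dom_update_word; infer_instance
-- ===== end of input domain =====

-- B replaces A's collect-match-indices-then-write loop by a positional rebuild of word_guess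
-- (a comprehension over enumerate(word_guess) slice-assigned back, so the same list object is
-- mutated and returned); the equivalence proved here is about the return value.


-- ===== PORT A =====
-- [i for i, letter in enumerate(s) if letter == ch]  (iterating a string yields 1-char strings)
def findOccurences (s : String) (ch : String) : List Int :=
  ((PySem.List.enumerate s.toList).filter (fun p => String.mk [p.2] == ch)).map (·.1)

-- while loop 'k < len(l): new_word[l[k]] = letter_guess; k += 1' as a left fold over l.
-- Indices from enumerate are nonnegative; within Pre_ they are in range, so List.set is exact there.
def update_word (word_length : Int) (word_guess : List String) (letter_guess : String) (word_answer : String) : List String :=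
  (findOccurences word_answer letter_guess).foldl (fun nw i => nw.set i.toNat letter_guess) word_guess

-- ===== PORT B =====
-- n = len(word_answer); [letter_guess if i < n and word_answer[i] == letter_guess else g
--                        for i, g in enumerate(word_guess)]   (slice-assigned back; return value ported)
def update_word_alt (word_length : Int) (word_guess : List String) (letter_guess : String) (word_answer : String) : List String :=
  let n : Int := (word_answer.toList.length : Int)
  (PySem.List.enumerate word_guess).map (fun p =>
    if p.1 < n && (PySem.List.pyGet? word_answer.toList p.1).any (fun c => String.mk [c] == letter_guess)
    then letter_guess else p.2)

-- ===== PRECONDITION & SPEC =====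
-- Pre_ excludes exactly the inputs on which A raises IndexError: a matching position of
-- word_answer lying at or beyond len(word_guess).
def Pre_update_word (word_length : Int) (word_guess : List String) (letter_guess : String) (word_answer : String) : Prop :=
  ∀ p ∈ word_answer.toList.zipIdx, String.mk [p.1] = letter_guess → p.2 < word_guess.length
instance (word_length : Int) (word_guess : List String) (letter_guess : String) (word_answer : String) : Decidable (Pre_update_word word_length word_guess letter_guess word_answer) := by unfold Pre_update_word; infer_instance

def pvWitness_update_word : Int × List String × String × String := (3, (["_", "_", "_"], "a", "cat"))

def Spec_update_word (word_length : Int) (word_guess : List String) (letter_guess : String) (word_answer : String) (out : List String) : Prop := out = update_word_alt word_length word_guess letter_guess word_answer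
instance (word_length : Int) (word_guess : List String) (letter_guess : String) (word_answer : String) (out : List String) : Decidable (Spec_update_word word_length word_guess letter_guess word_answer out) := by unfold Spec_update_word; infer_instance

-- ===== CLAIM (what is proved, stated in full; the proofs are below) =====
def Claim_equal_update_word : Prop := ∀ (word_length : Int) (word_guess : List String) (letter_guess : String) (word_answer : String), Dom_update_word word_length word_guess letter_guess word_answer → Pre_update_word word_length word_guess letter_guess word_answer → Spec_update_word word_length word_guess letter_guess word_answer (update_word word_length word_guess letter_guess word_answer)
-- ===== LEMMAS AND PROOFS =====

-- the value at position j after A's write loop over an index list l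
theorem foldl_set_getElem? (lg : String) (l : List Int) (wg : List String) (j : Nat) :
    (l.foldl (fun nw i => nw.set i.toNat lg) wg)[j]? =
      if (∃ i ∈ l, i.toNat = j) ∧ j < wg.length then some lg else wg[j]? := by
  induction l generalizing wg with
  | nil => simp
  | cons i l ih =>
    simp only [List.foldl_cons, ih, List.length_set, List.exists_mem_cons_iff]
    by_cases hj : j < wg.length
    · simp only [hj, and_true]
      by_cases hl : ∃ i' ∈ l, i'.toNat = j
      · simp [hl]
      · by_cases hi : i.toNat = j
        · subst hi
          simp [hl, List.getElem?_set_self, hj]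
        · simp [hl, hi, List.getElem?_set_ne (by simpa using hi)]
    · simp only [hj, and_false, if_false]
      rw [List.getElem?_eq_none (l := wg.set i.toNat lg) (by rw [List.length_set]; omega),
          List.getElem?_eq_none (by omega)]

-- membership in findOccurences: exactly the matching positions, as nonnegative Ints
theorem mem_findOccurences (wa lg : String) (i : Int) :
    i ∈ findOccurences wa lg ↔
      ∃ (k : Nat) (h : k < wa.toList.length), i = (k : Int) ∧ String.mk [wa.toList[k]] = lg := by
  unfold findOccurences
  simp only [List.mem_map, List.mem_filter, PySem.List.mem_enumerate_iff]
  constructor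
  · rintro ⟨⟨a, b⟩, ⟨⟨k, hk, hp⟩, hmatch⟩, rfl⟩
    obtain ⟨rfl, rfl⟩ := Prod.mk.injEq .. ▸ hp
    exact ⟨k, hk, by simp, by simpa using hmatch⟩
  · rintro ⟨k, hk, rfl, hm⟩
    exact ⟨((k : Int), wa.toList[k]), ⟨⟨k, hk, by simp⟩, by simpa using hm⟩, rfl⟩

-- ===== VERDICT (by name: the statement is the Claim_ definition above) =====
theorem update_word_spec : Claim_equal_update_word := by
  intro wl wg lg wa _ _
  unfold Spec_update_word update_word update_word_alt
  apply List.ext_getElem?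
  intro j
  rw [foldl_set_getElem?]
  simp only [List.getElem?_map, PySem.List.getElem?_enumerate]
  by_cases hj : j < wg.length
  · rw [List.getElem?_eq_getElem hj]
    simp only [Option.map_some, Option.some.injEq, zero_add]
    by_cases hm : ∃ (k : Nat) (h : k < wa.toList.length), (j : Int) = (k : Int) ∧ String.mk [wa.toList[k]] = lg
    · obtain ⟨k, hk, hkj, hmk⟩ := hm
      have hkj' : k = j := by exact_mod_cast hkj.symm
      subst hkj'
      have hA : (∃ i ∈ findOccurences wa lg, i.toNat = k) ∧ k < wg.length :=
        ⟨⟨(k : Int), (mem_findOccurences wa lg _).2 ⟨k, hk, rfl, hmk⟩, by simp⟩, hj⟩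
      have hlt : ((k : Int)) < (wa.toList.length : Int) := by exact_mod_cast hk
      have hcond : (decide ((k : Int) < (wa.toList.length : Int)) &&
          (PySem.List.pyGet? wa.toList (k : Int)).any (fun c => String.mk [c] == lg)) = true := by
        rw [PySem.List.pyGet?_natCast, List.getElem?_eq_getElem hk, decide_eq_true hlt]
        simp [hmk]
      rw [if_pos hA, hcond, if_pos rfl]
    · have hA : ¬ ((∃ i ∈ findOccurences wa lg, i.toNat = j) ∧ j < wg.length) := by
        rintro ⟨⟨i, hi, hij⟩, -⟩
        obtain ⟨k, hk, hik, hmk⟩ := (mem_findOccurences wa lg i).1 hi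
        refine hm ⟨k, hk, ?_, hmk⟩
        omega
      have hcond : (decide ((j : Int) < (wa.toList.length : Int)) &&
          (PySem.List.pyGet? wa.toList (j : Int)).any (fun c => String.mk [c] == lg)) = false := by
        by_cases hjn : ((j : Int)) < (wa.toList.length : Int)
        · have hjlt : j < wa.toList.length := by exact_mod_cast hjn
          have hne : ¬ String.mk [wa.toList[j]] = lg := fun h => hm ⟨j, hjlt, rfl, h⟩
          rw [PySem.List.pyGet?_natCast, List.getElem?_eq_getElem hjlt, decide_eq_true hjn]
          simp [hne]
        · rw [decide_eq_false hjn, Bool.false_and]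
      rw [if_neg hA, hcond]
      simp
  · have h0 : wg[j]? = none := List.getElem?_eq_none (by omega)
    simp [h0, hj]
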